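-- pv_equiv track=rewrite | github.com/Misora000/google-foobar | l4_running_with_bunnies.py | list_all_route
-- ===== SOURCE A (Python) =====
-- def list_all_route(sssp):
--     bunnies = [b for b in range(1, len(sssp)-1)]
--     sol = []
--     # dfs([0, 1, 2], [], 2, sol)
--     for l in range(len(bunnies)):
--         dfs(bunnies, [], len(bunnies)-l, sol)
--
--     route = []
--     for s in sol:
--         full_path = [0] + s + [len(sssp)-1]
--         route.append(full_path)
--
--     return route
--
-- def dfs(pool, stack, max_size, sol):
--     # find all permutations by dfs.
--     if len(pool) == 0:
--         return
--
--     for i in range(len(pool)):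
--         new_stack = stack[:]
--         new_stack.append(pool[i])
--         if len(new_stack) >= max_size:
--             sol.append(new_stack)
--             continue
--
--         new_pool = pool[:]
--         new_pool.pop(i)
--         dfs(new_pool, new_stack, max_size, sol)
--     return
-- ===== SOURCE B (Python) =====
-- import itertools
--
--
-- def list_all_route(sssp):
--     bunnies = list(range(1, len(sssp) - 1))
--     last = len(sssp) - 1
--     return [[0] + list(p) + [last]
--             for k in range(len(bunnies), 0, -1)
--             for p in itertools.permutations(bunnies, k)]
-- ===== Notes on version B (the rewrite author's own statement) =====
-- stated objective: idiomatic
-- what changed: Replaces the hand-written recursive DFS with explicit pool/stack copies and a mutated sol accumulator by a single comprehension over itertools.permutations(bunnies, k) for k counting down, which yields the identical sequence of routes.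
import Mathlib
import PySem

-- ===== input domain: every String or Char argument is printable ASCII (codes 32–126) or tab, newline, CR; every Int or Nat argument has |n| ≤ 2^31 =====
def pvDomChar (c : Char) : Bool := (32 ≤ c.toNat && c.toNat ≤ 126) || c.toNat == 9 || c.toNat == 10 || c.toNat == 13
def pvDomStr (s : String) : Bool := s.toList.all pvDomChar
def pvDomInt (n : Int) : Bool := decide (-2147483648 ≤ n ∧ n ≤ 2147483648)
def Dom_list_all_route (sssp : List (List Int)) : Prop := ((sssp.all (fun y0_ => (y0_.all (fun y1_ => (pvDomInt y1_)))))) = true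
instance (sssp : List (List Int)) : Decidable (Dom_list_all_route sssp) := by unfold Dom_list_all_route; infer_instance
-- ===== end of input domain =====

-- B replaces A's recursive DFS (pool/stack copies, mutated sol accumulator) by a
-- comprehension over itertools.permutations(bunnies, k) for k counting down; same output.

-- termination helper for the mutual recursions below (cited in decreasing_by)
theorem natlex_of {a b c d : Nat} (h : a < c ∨ (a = c ∧ b < d)) :
    Prod.Lex (· < ·) (· < ·) (a, b) (c, d) := by
  rcases h with h | ⟨h1, h2⟩
  · exact Prod.Lex.left _ _ h
  · subst h1; exact Prod.Lex.right _ h2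

-- ===== PORT A =====
-- dfsA ports A's `dfs`; dfsALoop is its `for i in range(len(pool))` loop, carrying the
-- already-visited prefix `prev` and remaining suffix `rest` (pool = prev ++ rest,
-- pool[i] = head of rest, new_stack = stack + [pool[i]], new_pool = pool[:i] + pool[i+1:] = prev ++ tail).
mutual
def dfsA : List Int → List Int → Int → List (List Int) → List (List Int)
  | pool, stack, maxSize, sol =>
    if pool = [] then sol
    else dfsALoop [] pool stack maxSize sol
  termination_by pool _ _ _ => (pool.length, pool.length + 1)
  decreasing_by all_goals (simp_wf; apply natlex_of; simp; try omega)

def dfsALoop : List Int → List Int → List Int → Int → List (List Int) → List (List Int)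
  | _, [], _, _, sol => sol
  | prev, x :: rest, stack, maxSize, sol =>
    if (((stack ++ [x]).length : Int)) ≥ maxSize then
      dfsALoop (prev ++ [x]) rest stack maxSize (sol ++ [stack ++ [x]])
    else
      dfsALoop (prev ++ [x]) rest stack maxSize (dfsA (prev ++ rest) (stack ++ [x]) maxSize sol)
  termination_by prev rest _ _ _ => (prev.length + rest.length, rest.length)
  decreasing_by all_goals (simp_wf; apply natlex_of; simp; try omega)
end

def list_all_route (sssp : List (List Int)) : List (List Int) :=
  let bunnies := PySem.List.pyRange 1 ((sssp.length : Int) - 1) 1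
  let sol := (List.range bunnies.length).foldl
    (fun sol (l : Nat) => dfsA bunnies [] ((bunnies.length : Int) - (l : Int)) sol) []
  sol.foldl (fun route s => route ++ [(0 : Int) :: (s ++ [(sssp.length : Int) - 1])]) []

-- ===== PORT B =====
-- kperms ports itertools.permutations(pool, k): all length-k permutations of pool's
-- elements in the lexicographic order of indices; kpermsSel selects each head in turn.
mutual
def kperms : Nat → List Int → List (List Int)
  | 0, _ => [[]]
  | k + 1, pool => kpermsSel [] pool k
  termination_by k pool => (k + pool.length, pool.length + 1)
  decreasing_by all_goals (simp_wf; apply natlex_of; simp; try omega)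

def kpermsSel : List Int → List Int → Nat → List (List Int)
  | _, [], _ => []
  | prev, x :: rest, k =>
    ((kperms k (prev ++ rest)).map (fun p => x :: p)) ++ kpermsSel (prev ++ [x]) rest k
  termination_by prev rest k => (k + (prev.length + rest.length), rest.length)
  decreasing_by all_goals (simp_wf; apply natlex_of; simp; try omega)
end

def list_all_route_alt (sssp : List (List Int)) : List (List Int) :=
  let bunnies := PySem.List.pyRange 1 ((sssp.length : Int) - 1) 1
  let last := (sssp.length : Int) - 1
  (PySem.List.pyRange (bunnies.length : Int) 0 (-1)).flatMap
    (fun k => (kperms k.toNat bunnies).map (fun p => 0 :: (p ++ [last])))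

-- ===== PRECONDITION & SPEC =====
def Spec_list_all_route (sssp : List (List Int)) (out : List (List Int)) : Prop := out = list_all_route_alt sssp
instance (sssp : List (List Int)) (out : List (List Int)) : Decidable (Spec_list_all_route sssp out) := by unfold Spec_list_all_route; infer_instance

-- ===== CLAIM (what is proved, stated in full; the proofs are below) =====
def Claim_equal_list_all_route : Prop := ∀ (sssp : List (List Int)), Dom_list_all_route sssp → Spec_list_all_route sssp (list_all_route sssp)

-- ===== LEMMAS AND PROOFS =====

theorem kperms_nil_of_pos (k : Nat) (h : k ≠ 0) : kperms k [] = [] := by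
  cases k with
  | zero => exact absurd rfl h
  | succ k => simp [kperms, kpermsSel]

mutual
theorem dfsA_eq (pool stack : List Int) (m : Int) (sol : List (List Int))
    (h : (stack.length : Int) + 1 ≤ m) :
    dfsA pool stack m sol
      = sol ++ (kperms (m - stack.length).toNat pool).map (fun p => stack ++ p) := by
  rw [dfsA]
  by_cases hp : pool = []
  · rw [if_pos hp, hp, kperms_nil_of_pos _ (by omega)]
    simp
  · rw [if_neg hp, dfsALoop_eq [] pool stack m sol h]
    have hk : (m - (stack.length : Int)).toNat = (m - (stack.length : Int) - 1).toNat + 1 := by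
      omega
    rw [hk]
    cases pool with
    | nil => exact absurd rfl hp
    | cons y ys => simp [kperms]
  termination_by (pool.length, pool.length + 1)
  decreasing_by all_goals (simp_wf; apply natlex_of; simp; try omega)

theorem dfsALoop_eq (prev rest stack : List Int) (m : Int) (sol : List (List Int))
    (h : (stack.length : Int) + 1 ≤ m) :
    dfsALoop prev rest stack m sol
      = sol ++ (kpermsSel prev rest (m - stack.length - 1).toNat).map (fun p => stack ++ p) := by
  cases rest with
  | nil => rw [dfsALoop]; simp [kpermsSel]
  | cons x rest' =>
    rw [dfsALoop]
    by_cases hge : (((stack ++ [x]).length : Int)) ≥ m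
    · rw [if_pos hge]
      have h1 : m = (stack.length : Int) + 1 := by
        simp at hge; omega
      have hz : (m - (stack.length : Int) - 1).toNat = 0 := by omega
      rw [dfsALoop_eq (prev ++ [x]) rest' stack m (sol ++ [stack ++ [x]]) h, hz]
      simp [kpermsSel, kperms]
    · rw [if_neg hge]
      have h2 : ((stack ++ [x]).length : Int) + 1 ≤ m := by
        simp at hge ⊢; omega
      rw [dfsA_eq (prev ++ rest') (stack ++ [x]) m sol h2]
      rw [dfsALoop_eq (prev ++ [x]) rest' stack m _ h]
      have he : (m - ((stack ++ [x]).length : Int)).toNat = (m - (stack.length : Int) - 1).toNat := by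
        simp; omega
      rw [he]
      simp [kpermsSel, List.map_map, Function.comp_def, List.append_assoc]
  termination_by (prev.length + rest.length, rest.length)
  decreasing_by all_goals (simp_wf; apply natlex_of; simp; try omega)
end

theorem flatMap_congr_mem {α β : Type} (xs : List α) (f g : α → List β)
    (h : ∀ x ∈ xs, f x = g x) : xs.flatMap f = xs.flatMap g := by
  induction xs with
  | nil => rfl
  | cons y ys ih =>
    simp only [List.flatMap_cons]
    rw [h y (List.mem_cons_self), ih (fun x hx => h x (List.mem_cons_of_mem _ hx))]

theorem sol_route (bunnies : List Int) (last : Int) :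
    ((List.range bunnies.length).foldl
        (fun sol (l : Nat) => dfsA bunnies [] ((bunnies.length : Int) - (l : Int)) sol) []).foldl
      (fun route s => route ++ [(0 : Int) :: (s ++ [last])]) []
    = (PySem.List.pyRange (bunnies.length : Int) 0 (-1)).flatMap
        (fun k => (kperms k.toNat bunnies).map (fun p => 0 :: (p ++ [last]))) := by
  have hsol : (List.range bunnies.length).foldl
      (fun sol (l : Nat) => dfsA bunnies [] ((bunnies.length : Int) - (l : Int)) sol) []
      = (List.range bunnies.length).flatMap (fun l => kperms (bunnies.length - l) bunnies) := by
    have step : ∀ (acc : List (List Int)) (l : Nat), l ∈ List.range bunnies.length →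
        dfsA bunnies [] ((bunnies.length : Int) - (l : Int)) acc
          = acc ++ kperms (bunnies.length - l) bunnies := by
      intro acc l hl
      have hlN : l < bunnies.length := List.mem_range.mp hl
      rw [dfsA_eq bunnies [] ((bunnies.length : Int) - (l : Int)) acc (by simp; omega)]
      have ht : (((bunnies.length : Int) - (l : Int)) - ((List.length ([] : List Int)) : Int)).toNat
          = bunnies.length - l := by simp; try omega
      rw [ht]
      simp
    rw [PySem.List.foldl_congr_mem (List.range bunnies.length) _
      (fun sol (l : Nat) => sol ++ kperms (bunnies.length - l) bunnies) [] step,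
      PySem.List.foldl_append_eq_flatMap]
    simp
  rw [hsol, PySem.List.foldl_append_singleton_eq_map, List.nil_append]
  rw [PySem.List.pyRange_neg_one]
  have hNt : ((bunnies.length : Int) - 0).toNat = bunnies.length := by omega
  rw [hNt, List.flatMap_map, List.map_flatMap]
  apply flatMap_congr_mem
  intro l hl
  have hlN : l < bunnies.length := List.mem_range.mp hl
  have ht : (((bunnies.length : Int) - (l : Int))).toNat = bunnies.length - l := by omega
  rw [ht]

-- ===== VERDICT (by name: the statement is the Claim_ definition above) =====
theorem list_all_route_spec : Claim_equal_list_all_route := by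
  intro sssp _
  unfold Spec_list_all_route list_all_route list_all_route_alt
  exact sol_route _ _
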